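-- pv_equiv track=rewrite | github.com/souptikm4/monte-carlo-assignment | momte_carlo_assignment.py | get_matrix_corners_and_sides
-- ===== SOURCE A (Python) =====
-- def get_matrix_corners_and_sides(matrix):
--     num_rows = len(matrix)
--     num_cols = len(matrix[0])
--
--     if num_rows < 2 or num_cols < 2:
--         return [], []
--
--     corners = [matrix[0][0], matrix[0][num_cols - 1], matrix[num_rows - 1][0], matrix[num_rows - 1][num_cols - 1]]
--
--     exposed_sides = []
--     for i in range(num_rows):
--         for j in range(num_cols):
--             if i == 0 and j not in [0, num_cols - 1]:
--                 exposed_sides.append(matrix[i][j])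
--             elif i == num_rows - 1 and j not in [0, num_cols - 1]:
--                 exposed_sides.append(matrix[i][j])
--             elif j == 0 and i not in [0, num_rows - 1]:
--                 exposed_sides.append(matrix[i][j])
--             elif j == num_cols - 1 and i not in [0, num_rows - 1]:
--                 exposed_sides.append(matrix[i][j])
--
--     return corners, exposed_sides
-- ===== SOURCE B (Python) =====
-- def get_matrix_corners_and_sides(matrix):
--     num_rows = len(matrix)
--     num_cols = len(matrix[0])
--
--     if num_rows < 2 or num_cols < 2:
--         return [], []
--
--     top = matrix[0]
--     bottom = matrix[num_rows - 1]
--     corners = [top[0], top[num_cols - 1], bottom[0], bottom[num_cols - 1]]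
--
--     exposed_sides = top[1:num_cols - 1]
--     for row in matrix[1:num_rows - 1]:
--         exposed_sides.append(row[0])
--         exposed_sides.append(row[num_cols - 1])
--     exposed_sides += bottom[1:num_cols - 1]
--
--     return corners, exposed_sides
-- ===== Notes on version B (the rewrite author's own statement) =====
-- stated objective: faster
-- what changed: B builds the result from the border only (top-row interior slice, the two edge cells of each middle row, bottom-row interior slice) instead of scanning every cell with nested loops and per-cell membership tests.
import Mathlib
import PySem

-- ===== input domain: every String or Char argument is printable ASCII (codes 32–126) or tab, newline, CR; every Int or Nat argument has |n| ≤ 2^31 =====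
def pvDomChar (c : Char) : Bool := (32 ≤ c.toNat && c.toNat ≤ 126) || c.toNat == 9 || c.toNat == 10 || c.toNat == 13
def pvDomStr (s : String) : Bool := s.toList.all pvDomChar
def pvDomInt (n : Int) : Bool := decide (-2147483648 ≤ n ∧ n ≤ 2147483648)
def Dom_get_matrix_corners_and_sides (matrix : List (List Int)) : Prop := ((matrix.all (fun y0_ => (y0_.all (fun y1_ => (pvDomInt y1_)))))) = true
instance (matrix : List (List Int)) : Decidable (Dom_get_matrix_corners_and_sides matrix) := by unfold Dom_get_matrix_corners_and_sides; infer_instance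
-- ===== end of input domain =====

-- B builds the result from the border cells only (top interior slice, two cells per
-- middle row, bottom interior slice) instead of A's full row-major scan with per-cell
-- membership tests.

-- ===== PORT A =====
-- pyGetD is exact here: Pre_ guarantees every index taken is in range.
def get_matrix_corners_and_sides (matrix : List (List Int)) : List Int × List Int :=
  let num_rows : Int := (matrix.length : Int)
  let num_cols : Int := ((PySem.List.pyGetD matrix 0 []).length : Int)
  if num_rows < 2 ∨ num_cols < 2 then ([], [])
  else
    let corners : List Int :=
      [PySem.List.pyGetD (PySem.List.pyGetD matrix 0 []) 0 0,
       PySem.List.pyGetD (PySem.List.pyGetD matrix 0 []) (num_cols - 1) 0,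
       PySem.List.pyGetD (PySem.List.pyGetD matrix (num_rows - 1) []) 0 0,
       PySem.List.pyGetD (PySem.List.pyGetD matrix (num_rows - 1) []) (num_cols - 1) 0]
    let exposed_sides : List Int :=
      (PySem.List.pyRange 0 num_rows 1).foldl (fun acc i =>
        (PySem.List.pyRange 0 num_cols 1).foldl (fun acc j =>
          if i = 0 ∧ ¬(j = 0 ∨ j = num_cols - 1) then
            acc ++ [PySem.List.pyGetD (PySem.List.pyGetD matrix i []) j 0]
          else if i = num_rows - 1 ∧ ¬(j = 0 ∨ j = num_cols - 1) then
            acc ++ [PySem.List.pyGetD (PySem.List.pyGetD matrix i []) j 0]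
          else if j = 0 ∧ ¬(i = 0 ∨ i = num_rows - 1) then
            acc ++ [PySem.List.pyGetD (PySem.List.pyGetD matrix i []) j 0]
          else if j = num_cols - 1 ∧ ¬(i = 0 ∨ i = num_rows - 1) then
            acc ++ [PySem.List.pyGetD (PySem.List.pyGetD matrix i []) j 0]
          else acc) acc) []
    (corners, exposed_sides)

-- ===== PORT B =====
def get_matrix_corners_and_sides_alt (matrix : List (List Int)) : List Int × List Int :=
  let num_rows : Int := (matrix.length : Int)
  let num_cols : Int := ((PySem.List.pyGetD matrix 0 []).length : Int)
  if num_rows < 2 ∨ num_cols < 2 then ([], [])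
  else
    let top := PySem.List.pyGetD matrix 0 []
    let bottom := PySem.List.pyGetD matrix (num_rows - 1) []
    let corners : List Int :=
      [PySem.List.pyGetD top 0 0, PySem.List.pyGetD top (num_cols - 1) 0,
       PySem.List.pyGetD bottom 0 0, PySem.List.pyGetD bottom (num_cols - 1) 0]
    let exposed_sides : List Int :=
      (PySem.List.slice matrix (some 1) (some (num_rows - 1))).foldl
        (fun acc row => acc ++ [PySem.List.pyGetD row 0 0, PySem.List.pyGetD row (num_cols - 1) 0])
        (PySem.List.slice top (some 1) (some (num_cols - 1)))
      ++ PySem.List.slice bottom (some 1) (some (num_cols - 1))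
    (corners, exposed_sides)

-- ===== PRECONDITION & SPEC =====
-- A raises exactly on the empty matrix (IndexError on matrix[0]) and, when there are at
-- least 2 rows and 2 columns, on ragged matrices with a row shorter than the first row
-- (IndexError while reading border cells); Pre_ excludes exactly those inputs.
def Pre_get_matrix_corners_and_sides (matrix : List (List Int)) : Prop :=
  matrix ≠ [] ∧
  (2 ≤ matrix.length ∧ 2 ≤ (matrix.headD []).length →
    ∀ row ∈ matrix, (matrix.headD []).length ≤ row.length)
instance (matrix : List (List Int)) : Decidable (Pre_get_matrix_corners_and_sides matrix) := by
  unfold Pre_get_matrix_corners_and_sides; infer_instance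

def pvWitness_get_matrix_corners_and_sides : List (List Int) := [[1, 2], [3, 4]]

def Spec_get_matrix_corners_and_sides (matrix : List (List Int)) (out : List Int × List Int) : Prop := out = get_matrix_corners_and_sides_alt matrix
instance (matrix : List (List Int)) (out : List Int × List Int) : Decidable (Spec_get_matrix_corners_and_sides matrix out) := by unfold Spec_get_matrix_corners_and_sides; infer_instance

-- ===== CLAIM (what is proved, stated in full; the proofs are below) =====
def Claim_equal_get_matrix_corners_and_sides : Prop := ∀ (matrix : List (List Int)), Dom_get_matrix_corners_and_sides matrix → Pre_get_matrix_corners_and_sides matrix → Spec_get_matrix_corners_and_sides matrix (get_matrix_corners_and_sides matrix)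

-- ===== LEMMAS AND PROOFS =====

-- range m, for m ≥ 2, split into first index, interior indices, last index
lemma pv_range_split (m : Nat) (h : 2 ≤ m) :
    List.range m = 0 :: (List.range' 1 (m - 2) ++ [m - 1]) := by
  obtain ⟨k, rfl⟩ : ∃ k, m = k + 2 := ⟨m - 2, by omega⟩
  rw [List.range_eq_range', show k + 2 = (k + 1) + 1 from rfl, List.range'_succ,
      show k + 1 = k + 1 from rfl, List.range'_concat]
  simp
  omega

-- indexing a list at the interior indices 1 .. b is a drop/take slice
lemma pv_map_range'_pyGetD {α : Type} (xs : List α) (d : α) (b : Nat) (h : 1 + b ≤ xs.length) :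
    (List.range' 1 b).map (fun (j : Nat) => PySem.List.pyGetD xs (j : Int) d) = (xs.drop 1).take b := by
  apply List.ext_getElem
  · simp; omega
  · intro i h1 h2
    have hib : i < b := by simpa using h1
    rw [List.getElem_map, List.getElem_range',
        show ((1 + 1 * i : Nat) : Int) = ((1 + i : Nat) : Int) by omega,
        PySem.List.pyGetD_natCast, List.getD_eq_getElem xs d (by omega),
        List.getElem_take, List.getElem_drop]

lemma pv_filter_range_interior (m : Nat) (h : 2 ≤ m) :
    (List.range m).filter (fun (j : ℕ) => decide (¬(j = 0 ∨ j = m - 1))) = List.range' 1 (m - 2) := by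
  rw [pv_range_split m h, List.filter_cons, List.filter_append]
  have h0 : (decide (¬((0:Nat) = 0 ∨ (0:Nat) = m - 1))) = false := by simp
  have hlast : List.filter (fun (j : ℕ) => decide (¬(j = 0 ∨ j = m - 1))) [m - 1] = [] := by simp
  rw [h0, hlast, List.filter_eq_self.mpr]
  · simp
  · intro a ha
    have := List.mem_range'_1.mp ha
    simp only [decide_eq_true_eq]
    omega

lemma pv_filter_range_ends (m : Nat) (h : 2 ≤ m) :
    (List.range m).filter (fun (j : ℕ) => decide (j = 0 ∨ j = m - 1)) = [0, m - 1] := by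
  rw [pv_range_split m h, List.filter_cons, List.filter_append]
  have h0 : (decide ((0:Nat) = 0 ∨ (0:Nat) = m - 1)) = true := by simp
  have hmid : List.filter (fun (j : ℕ) => decide (j = 0 ∨ j = m - 1)) (List.range' 1 (m - 2)) = [] := by
    rw [List.filter_eq_nil_iff]
    intro a ha
    have := List.mem_range'_1.mp ha
    simp only [decide_eq_true_eq]
    omega
  rw [h0, hmid]
  simp

-- the four-branch append chain of A's inner loop collapses to one condition
lemma pv_ite_chain (p1 p2 p3 p4 : Prop) [Decidable p1] [Decidable p2] [Decidable p3] [Decidable p4]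
    (a : List Int) (v : Int) :
    (if p1 then a ++ [v] else if p2 then a ++ [v] else if p3 then a ++ [v]
     else if p4 then a ++ [v] else a)
      = (if p1 ∨ p2 ∨ p3 ∨ p4 then a ++ [v] else a) := by
  split_ifs <;> tauto

-- ===== VERDICT (by name: the statement is the Claim_ definition above) =====
theorem get_matrix_corners_and_sides_spec : Claim_equal_get_matrix_corners_and_sides := by
  intro matrix _hdom hpre
  obtain ⟨hne, hrows⟩ := hpre
  unfold Spec_get_matrix_corners_and_sides
  simp only [get_matrix_corners_and_sides, get_matrix_corners_and_sides_alt]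
  split_ifs with hc
  · rfl
  · simp only [Prod.mk.injEq]
    refine ⟨trivial, ?_⟩
    have hn2 : 2 ≤ matrix.length := by omega
    have hm2 : 2 ≤ (PySem.List.pyGetD matrix 0 []).length := by omega
    have htop : matrix.headD [] = PySem.List.pyGetD matrix 0 [] := by
      cases matrix with
      | nil => exact absurd rfl hne
      | cons a l => simp [PySem.List.pyGetD_ofNat']
    have hrows' : ∀ row ∈ matrix, (PySem.List.pyGetD matrix 0 []).length ≤ row.length := by
      rw [← htop]; exact hrows ⟨hn2, htop ▸ hm2⟩
    set t := PySem.List.pyGetD matrix 0 [] with htdef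
    set n := matrix.length with hndef
    set m := t.length with hmdef
    -- A's inner loop over the columns is a filter-then-map over the column indices
    have hinner : ∀ (i : ℤ) (acc : List ℤ),
        List.foldl (fun acc j => if i = 0 ∧ ¬(j = 0 ∨ j = (m : ℤ) - 1) then acc ++ [PySem.List.pyGetD (PySem.List.pyGetD matrix i []) j 0] else if i = (n : ℤ) - 1 ∧ ¬(j = 0 ∨ j = (m : ℤ) - 1) then acc ++ [PySem.List.pyGetD (PySem.List.pyGetD matrix i []) j 0] else if j = 0 ∧ ¬(i = 0 ∨ i = (n : ℤ) - 1) then acc ++ [PySem.List.pyGetD (PySem.List.pyGetD matrix i []) j 0] else if j = (m : ℤ) - 1 ∧ ¬(i = 0 ∨ i = (n : ℤ) - 1) then acc ++ [PySem.List.pyGetD (PySem.List.pyGetD matrix i []) j 0] else acc) acc (PySem.List.pyRange 0 (m : ℤ))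
          = acc ++ ((List.range m).filter (fun (j : ℕ) => decide ((i = 0 ∧ ¬((j : ℤ) = 0 ∨ (j : ℤ) = (m : ℤ) - 1)) ∨ (i = (n : ℤ) - 1 ∧ ¬((j : ℤ) = 0 ∨ (j : ℤ) = (m : ℤ) - 1)) ∨ ((j : ℤ) = 0 ∧ ¬(i = 0 ∨ i = (n : ℤ) - 1)) ∨ ((j : ℤ) = (m : ℤ) - 1 ∧ ¬(i = 0 ∨ i = (n : ℤ) - 1))))).map (fun (j : ℕ) => PySem.List.pyGetD (PySem.List.pyGetD matrix i []) (j : ℤ) 0) := by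
      intro i acc
      rw [PySem.List.pyRange_zero_natCast, List.foldl_map]
      rw [PySem.List.foldl_congr_mem (List.range m) _
            (fun acc (j : ℕ) => if (i = 0 ∧ ¬((j : ℤ) = 0 ∨ (j : ℤ) = (m : ℤ) - 1)) ∨ (i = (n : ℤ) - 1 ∧ ¬((j : ℤ) = 0 ∨ (j : ℤ) = (m : ℤ) - 1)) ∨ ((j : ℤ) = 0 ∧ ¬(i = 0 ∨ i = (n : ℤ) - 1)) ∨ ((j : ℤ) = (m : ℤ) - 1 ∧ ¬(i = 0 ∨ i = (n : ℤ) - 1)) then acc ++ [PySem.List.pyGetD (PySem.List.pyGetD matrix i []) (j : ℤ) 0] else acc) acc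
            (fun acc j _ => pv_ite_chain _ _ _ _ acc _)]
      exact PySem.List.foldl_append_ite _ _ _ _
    -- A's outer loop becomes a flatMap over the row indices
    trans (List.foldl (fun acc (i : ℤ) => acc ++ ((List.range m).filter (fun (j : ℕ) => decide ((i = 0 ∧ ¬((j : ℤ) = 0 ∨ (j : ℤ) = (m : ℤ) - 1)) ∨ (i = (n : ℤ) - 1 ∧ ¬((j : ℤ) = 0 ∨ (j : ℤ) = (m : ℤ) - 1)) ∨ ((j : ℤ) = 0 ∧ ¬(i = 0 ∨ i = (n : ℤ) - 1)) ∨ ((j : ℤ) = (m : ℤ) - 1 ∧ ¬(i = 0 ∨ i = (n : ℤ) - 1))))).map (fun (j : ℕ) => PySem.List.pyGetD (PySem.List.pyGetD matrix i []) (j : ℤ) 0)) [] (PySem.List.pyRange 0 (n : ℤ)))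
    · exact PySem.List.foldl_congr_mem _ _ _ _ (fun acc i _ => hinner i acc)
    rw [PySem.List.pyRange_zero_natCast, List.foldl_map]
    trans ([] ++ List.flatMap (fun (i : ℕ) => ((List.range m).filter (fun (j : ℕ) => decide (((i : ℤ) = 0 ∧ ¬((j : ℤ) = 0 ∨ (j : ℤ) = (m : ℤ) - 1)) ∨ ((i : ℤ) = (n : ℤ) - 1 ∧ ¬((j : ℤ) = 0 ∨ (j : ℤ) = (m : ℤ) - 1)) ∨ ((j : ℤ) = 0 ∧ ¬((i : ℤ) = 0 ∨ (i : ℤ) = (n : ℤ) - 1)) ∨ ((j : ℤ) = (m : ℤ) - 1 ∧ ¬((i : ℤ) = 0 ∨ (i : ℤ) = (n : ℤ) - 1))))).map (fun (j : ℕ) => PySem.List.pyGetD (PySem.List.pyGetD matrix (i : ℤ) []) (j : ℤ) 0)) (List.range n))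
    · exact PySem.List.foldl_append_eq_flatMap _ _ _
    rw [List.nil_append, pv_range_split n hn2, List.flatMap_cons, List.flatMap_append,
        List.flatMap_singleton]
    rw [Nat.cast_zero, ← htdef]
    -- top row: interior slice of the first row
    have hTop : ((List.range m).filter (fun (j : ℕ) => decide (((0 : ℤ) = 0 ∧ ¬((j : ℤ) = 0 ∨ (j : ℤ) = (m : ℤ) - 1)) ∨ ((0 : ℤ) = (n : ℤ) - 1 ∧ ¬((j : ℤ) = 0 ∨ (j : ℤ) = (m : ℤ) - 1)) ∨ ((j : ℤ) = 0 ∧ ¬((0 : ℤ) = 0 ∨ (0 : ℤ) = (n : ℤ) - 1)) ∨ ((j : ℤ) = (m : ℤ) - 1 ∧ ¬((0 : ℤ) = 0 ∨ (0 : ℤ) = (n : ℤ) - 1))))).map (fun (j : ℕ) => PySem.List.pyGetD (t) (j : ℤ) 0) = (t.drop 1).take (m - 2) := by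
      have hf : List.filter (fun (j : ℕ) => decide (((0 : ℤ) = 0 ∧ ¬((j : ℤ) = 0 ∨ (j : ℤ) = (m : ℤ) - 1)) ∨ ((0 : ℤ) = (n : ℤ) - 1 ∧ ¬((j : ℤ) = 0 ∨ (j : ℤ) = (m : ℤ) - 1)) ∨ ((j : ℤ) = 0 ∧ ¬((0 : ℤ) = 0 ∨ (0 : ℤ) = (n : ℤ) - 1)) ∨ ((j : ℤ) = (m : ℤ) - 1 ∧ ¬((0 : ℤ) = 0 ∨ (0 : ℤ) = (n : ℤ) - 1)))) (List.range m)
          = List.filter (fun (j : ℕ) => decide (¬(j = 0 ∨ j = m - 1))) (List.range m) :=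
        List.filter_congr (fun (j : ℕ) hj => by
          have hjm := List.mem_range.mp hj
          exact decide_eq_decide.mpr (by omega))
      rw [hf, pv_filter_range_interior m hm2, pv_map_range'_pyGetD t 0 (m - 2) (by omega)]
    -- bottom row: interior slice of the last row
    have hlenB : m ≤ (PySem.List.pyGetD matrix ((n - 1 : ℕ) : ℤ) []).length := by
      rw [PySem.List.pyGetD_natCast, List.getD_eq_getElem matrix [] (by omega)]
      exact hrows' _ (List.getElem_mem (by omega))
    have hBot : ((List.range m).filter (fun (j : ℕ) => decide ((((n - 1 : ℕ) : ℤ) = 0 ∧ ¬((j : ℤ) = 0 ∨ (j : ℤ) = (m : ℤ) - 1)) ∨ (((n - 1 : ℕ) : ℤ) = (n : ℤ) - 1 ∧ ¬((j : ℤ) = 0 ∨ (j : ℤ) = (m : ℤ) - 1)) ∨ ((j : ℤ) = 0 ∧ ¬(((n - 1 : ℕ) : ℤ) = 0 ∨ ((n - 1 : ℕ) : ℤ) = (n : ℤ) - 1)) ∨ ((j : ℤ) = (m : ℤ) - 1 ∧ ¬(((n - 1 : ℕ) : ℤ) = 0 ∨ ((n - 1 : ℕ) : ℤ) = (n : ℤ)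 - 1))))).map (fun (j : ℕ) => PySem.List.pyGetD (PySem.List.pyGetD matrix ((n - 1 : ℕ) : ℤ) []) (j : ℤ) 0)
        = ((PySem.List.pyGetD matrix ((n - 1 : ℕ) : ℤ) []).drop 1).take (m - 2) := by
      have hf : List.filter (fun (j : ℕ) => decide ((((n - 1 : ℕ) : ℤ) = 0 ∧ ¬((j : ℤ) = 0 ∨ (j : ℤ) = (m : ℤ) - 1)) ∨ (((n - 1 : ℕ) : ℤ) = (n : ℤ) - 1 ∧ ¬((j : ℤ) = 0 ∨ (j : ℤ) = (m : ℤ) - 1)) ∨ ((j : ℤ) = 0 ∧ ¬(((n - 1 : ℕ) : ℤ) = 0 ∨ ((n - 1 : ℕ) : ℤ) = (n : ℤ) - 1)) ∨ ((j : ℤ) = (m : ℤ) - 1 ∧ ¬(((n - 1 : ℕ) : ℤ) = 0 ∨ ((n - 1 : ℕ) : ℤ) = (n : ℤ) - 1)))) (List.range m)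
          = List.filter (fun (j : ℕ) => decide (¬(j = 0 ∨ j = m - 1))) (List.range m) :=
        List.filter_congr (fun (j : ℕ) hj => by
          have hjm := List.mem_range.mp hj
          exact decide_eq_decide.mpr (by omega))
      rw [hf, pv_filter_range_interior m hm2,
          pv_map_range'_pyGetD (PySem.List.pyGetD matrix ((n - 1 : ℕ) : ℤ) []) 0 (m - 2) (by omega)]
    -- middle rows: exactly the two edge cells of each row
    have hMid : List.flatMap (fun (i : ℕ) => ((List.range m).filter (fun (j : ℕ) => decide (((i : ℤ) = 0 ∧ ¬((j : ℤ) = 0 ∨ (j : ℤ) = (m : ℤ) - 1)) ∨ ((i : ℤ) = (n : ℤ) - 1 ∧ ¬((j : ℤ) = 0 ∨ (j : ℤ) = (m : ℤ) - 1)) ∨ ((j : ℤ) = 0 ∧ ¬((i : ℤ) = 0 ∨ (i : ℤ) = (n : ℤ) - 1)) ∨ ((j : ℤ) = (m : ℤ) - 1 ∧ ¬((i : ℤ) = 0 ∨ (i : ℤ) = (n : ℤ) - 1))))).map (fun (j : ℕ) => PySem.List.pyGetD (PySem.List.pyGetD matrix (i : ℤ) []) (j : ℤ) 0)) (List.range'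 1 (n - 2))
        = List.flatMap (fun row => [PySem.List.pyGetD row 0 0, PySem.List.pyGetD row ((m : ℤ) - 1) 0]) ((matrix.drop 1).take (n - 2)) := by
      rw [← pv_map_range'_pyGetD matrix [] (n - 2) (by omega), List.flatMap_map]
      refine List.flatMap_congr (fun i hi => ?_)
      have hib := List.mem_range'_1.mp hi
      have hf : List.filter (fun (j : ℕ) => decide (((i : ℤ) = 0 ∧ ¬((j : ℤ) = 0 ∨ (j : ℤ) = (m : ℤ) - 1)) ∨ ((i : ℤ) = (n : ℤ) - 1 ∧ ¬((j : ℤ) = 0 ∨ (j : ℤ) = (m : ℤ) - 1)) ∨ ((j : ℤ) = 0 ∧ ¬((i : ℤ) = 0 ∨ (i : ℤ) = (n : ℤ) - 1)) ∨ ((j : ℤ) = (m : ℤ) - 1 ∧ ¬((i : ℤ) = 0 ∨ (i : ℤ) = (n : ℤ) - 1)))) (List.range m)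
          = List.filter (fun (j : ℕ) => decide (j = 0 ∨ j = m - 1)) (List.range m) :=
        List.filter_congr (fun (j : ℕ) hj => by
          have hjm := List.mem_range.mp hj
          exact decide_eq_decide.mpr (by omega))
      rw [hf, pv_filter_range_ends m hm2]
      simp only [List.map_cons, List.map_nil, Nat.cast_zero]
      rw [show ((m - 1 : ℕ) : ℤ) = (m : ℤ) - 1 by omega]
    rw [hTop, hBot, hMid]
    -- B's loop over the middle slice is the same flatMap, started from the top slice
    trans ((PySem.List.slice t (some 1) (some ((m : ℤ) - 1))
        ++ List.flatMap (fun row => [PySem.List.pyGetD row 0 0, PySem.List.pyGetD row ((m : ℤ) - 1) 0]) (PySem.List.slice matrix (some 1) (some ((n : ℤ) - 1))))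
        ++ PySem.List.slice (PySem.List.pyGetD matrix ((n : ℤ) - 1) []) (some 1) (some ((m : ℤ) - 1)))
    swap
    · rw [PySem.List.foldl_append_eq_flatMap]
    have hs1 : PySem.List.slice matrix (some 1) (some ((n : ℤ) - 1)) = (matrix.drop 1).take (n - 2) := by
      rw [PySem.List.slice_toNat matrix (by norm_num) (by omega),
          show ((1 : ℤ)).toNat = 1 from rfl, show ((n : ℤ) - 1).toNat = n - 1 by omega,
          show n - 1 - 1 = n - 2 by omega]
    have hs2 : PySem.List.slice t (some 1) (some ((m : ℤ) - 1)) = (t.drop 1).take (m - 2) := by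
      rw [PySem.List.slice_toNat t (by norm_num) (by omega),
          show ((1 : ℤ)).toNat = 1 from rfl, show ((m : ℤ) - 1).toNat = m - 1 by omega,
          show m - 1 - 1 = m - 2 by omega]
    have hrowB : PySem.List.pyGetD matrix ((n : ℤ) - 1) [] = PySem.List.pyGetD matrix ((n - 1 : ℕ) : ℤ) [] := by
      rw [show ((n : ℤ) - 1) = ((n - 1 : ℕ) : ℤ) by omega]
    have hs3 : PySem.List.slice (PySem.List.pyGetD matrix ((n : ℤ) - 1) []) (some 1) (some ((m : ℤ) - 1))
        = ((PySem.List.pyGetD matrix ((n - 1 : ℕ) : ℤ) []).drop 1).take (m - 2) := by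
      rw [hrowB, PySem.List.slice_toNat _ (by norm_num) (by omega),
          show ((1 : ℤ)).toNat = 1 from rfl, show ((m : ℤ) - 1).toNat = m - 1 by omega,
          show m - 1 - 1 = m - 2 by omega]
    rw [hs1, hs2, hs3, List.append_assoc]
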